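-- pv_equiv track=rewrite | github.com/jhongucla/Python-projects | lcd.py | nine
-- ===== SOURCE A (Python) =====
-- def nine(s):
--     output = []
--     output.append([' '] + ['-']*s + [' '])
--     for x in range(s):
--         output.append(['|'] + [' ']*s + ['|'])
--     output.append([' '] + ['-']*s + [' '])
--     for x in range(s):
--         output.append([' ']*(s + 1) + ['|'])
--     output.append([' '] + ['-']*s + [' '])
--     return output
-- ===== SOURCE B (Python) =====
-- def nine(s):
--     n = max(s, 0)
--     left  = [' '] + ['|'] * n + [' '] + [' '] * n + [' ']
--     mid   = ['-'] + [' '] * n + ['-'] + [' '] * n + ['-']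
--     right = [' '] + ['|'] * n + [' '] + ['|'] * n + [' ']
--     cols = [left] + [mid] * n + [right]
--     return [list(row) for row in zip(*cols)]
-- ===== Notes on version B (the rewrite author's own statement) =====
-- stated objective: alternative
-- what changed: A assembles the figure row by row in three sequential append phases; B builds the figure column-major from three column templates (left, interior, right) and transposes them with zip(*cols) to obtain the rows.
import Mathlib
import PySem

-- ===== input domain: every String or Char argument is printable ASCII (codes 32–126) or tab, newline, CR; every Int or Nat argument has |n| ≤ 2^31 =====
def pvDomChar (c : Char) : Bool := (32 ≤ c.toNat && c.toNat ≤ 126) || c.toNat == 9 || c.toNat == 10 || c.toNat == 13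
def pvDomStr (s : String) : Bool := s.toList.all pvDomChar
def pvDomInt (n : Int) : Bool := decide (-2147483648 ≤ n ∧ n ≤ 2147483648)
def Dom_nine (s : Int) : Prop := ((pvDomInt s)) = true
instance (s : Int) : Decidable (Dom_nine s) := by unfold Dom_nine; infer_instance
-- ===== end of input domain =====

-- B builds the figure column-major (three column templates, transposed via zip(*cols))
-- instead of A's row-by-row appending; an alternative decomposition, same cost.

-- ===== PORT A =====
def nine (s : Int) : List (List String) :=
  let output : List (List String) := []
  let output := output ++ [[" "] ++ PySem.List.pyRepeat ["-"] s ++ [" "]]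
  let output := (PySem.List.pyRange 0 s 1).foldl
    (fun out _ => out ++ [["|"] ++ PySem.List.pyRepeat [" "] s ++ ["|"]]) output
  let output := output ++ [[" "] ++ PySem.List.pyRepeat ["-"] s ++ [" "]]
  let output := (PySem.List.pyRange 0 s 1).foldl
    (fun out _ => out ++ [PySem.List.pyRepeat [" "] (s + 1) ++ ["|"]]) output
  output ++ [[" "] ++ PySem.List.pyRepeat ["-"] s ++ [" "]]

-- ===== PORT B =====
-- faithful port of Python's zip(*cols): take one element from the head of every column
-- while all columns are nonempty; the fuel (length of the first column) bounds the number
-- of rows zip can produce, so the guarded recursion is exactly zip's stopping rule.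
def zipColsAux : Nat → List (List String) → List (List String)
  | 0, _ => []
  | Nat.succ k, cols =>
    if cols.all (fun c => !c.isEmpty) then
      cols.map (fun c => c.headD "") :: zipColsAux k (cols.map List.tail)
    else []

def nine_alt (s : Int) : List (List String) :=
  let n := max s 0
  let left  := [" "] ++ PySem.List.pyRepeat ["|"] n ++ [" "] ++ PySem.List.pyRepeat [" "] n ++ [" "]
  let mid   := ["-"] ++ PySem.List.pyRepeat [" "] n ++ ["-"] ++ PySem.List.pyRepeat [" "] n ++ ["-"]
  let right := [" "] ++ PySem.List.pyRepeat ["|"] n ++ [" "] ++ PySem.List.pyRepeat ["|"] n ++ [" "]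
  let cols := [left] ++ PySem.List.pyRepeat [mid] n ++ [right]
  zipColsAux (cols.headD []).length cols

-- ===== PRECONDITION & SPEC =====
def Spec_nine (s : Int) (out : List (List String)) : Prop := out = nine_alt s
instance (s : Int) (out : List (List String)) : Decidable (Spec_nine s out) := by unfold Spec_nine; infer_instance

-- ===== CLAIM (what is proved, stated in full; the proofs are below) =====
def Claim_equal_nine : Prop := ∀ (s : Int), Dom_nine s → Spec_nine s (nine s)

-- ===== LEMMAS AND PROOFS =====

-- A's row-appending loop appends length-many copies of the constant row.
theorem foldl_append_const {α β : Type} (l : List β) (row : List α) (init : List (List α)) :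
    l.foldl (fun out _ => out ++ [row]) init = init ++ List.replicate l.length row := by
  induction l generalizing init with
  | nil => simp
  | cons x xs ih => simp [List.foldl_cons, ih, List.replicate_succ]

-- the row-building recursion that zipColsAux performs on the three-template column list
def rows3 (n : Nat) : List String → List String → List String → List (List String)
  | a :: as, b :: bs, c :: cs => ([a] ++ List.replicate n b ++ [c]) :: rows3 n as bs cs
  | _, _, _ => []

theorem zipColsAux_cols3 (n : Nat) (c1 c2 c3 : List String)
    (h2 : c2.length = c1.length) (h3 : c3.length = c1.length) :
    zipColsAux c1.length ([c1] ++ List.replicate n c2 ++ [c3]) = rows3 n c1 c2 c3 := by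
  induction c1 generalizing c2 c3 with
  | nil => cases c2 <;> cases c3 <;> simp_all [zipColsAux, rows3]
  | cons a as ih =>
      cases c2 with
      | nil => simp at h2
      | cons b bs =>
        cases c3 with
        | nil => simp at h3
        | cons c cs =>
          simp only [List.length_cons, zipColsAux]
          rw [if_pos]
          · simp only [List.map_append, List.map_cons, List.map_nil, List.map_replicate,
              List.headD, List.tail]
            rw [rows3]
            congr 1
            have := ih bs cs (by simpa using h2) (by simpa using h3)
            simpa using this
          · simp

theorem rows3_cons (n : Nat) (a b c : String) (l1 l2 l3 : List String) :
    rows3 n (a :: l1) (b :: l2) (c :: l3)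
      = ([a] ++ List.replicate n b ++ [c]) :: rows3 n l1 l2 l3 := rfl

theorem rows3_block (n t : Nat) (x y z : String) (l1 l2 l3 : List String) :
    rows3 n (List.replicate t x ++ l1) (List.replicate t y ++ l2) (List.replicate t z ++ l3)
      = List.replicate t ([x] ++ List.replicate n y ++ [z]) ++ rows3 n l1 l2 l3 := by
  induction t with
  | zero => simp
  | succ t ih => simp [List.replicate_succ, rows3_cons, ih]

theorem rows3_last (n : Nat) (a b c : String) :
    rows3 n [a] [b] [c] = [[a] ++ List.replicate n b ++ [c]] := rfl

theorem zipCols3 (n : Nat) (c1 c2 c3 : List String)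
    (h2 : c2.length = c1.length) (h3 : c3.length = c1.length) :
    zipColsAux (([c1] ++ List.replicate n c2 ++ [c3]).headD []).length
      ([c1] ++ List.replicate n c2 ++ [c3]) = rows3 n c1 c2 c3 := by
  have h : ([c1] ++ List.replicate n c2 ++ [c3]).headD [] = c1 := rfl
  rw [h]; exact zipColsAux_cols3 n c1 c2 c3 h2 h3

-- ===== VERDICT (by name: the statement is the Claim_ definition above) =====
theorem nine_spec : Claim_equal_nine := by
  intro s _
  show nine s = nine_alt s
  have hmax : max s 0 = ((s.toNat : Int)) := by omega
  have hrow : List.replicate s.toNat (List.replicate (s + 1).toNat " " ++ ["|"])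
      = List.replicate s.toNat (" " :: (List.replicate s.toNat " " ++ ["|"])) := by
    rcases Nat.eq_zero_or_pos s.toNat with h | h
    · simp [h]
    · rw [show (s + 1).toNat = s.toNat + 1 from by omega]
      simp [List.replicate_succ]
  simp only [nine, nine_alt, hmax, foldl_append_const, PySem.List.length_pyRange_one,
    PySem.List.pyRepeat_singleton, Int.toNat_natCast, List.nil_append]
  rw [show (s - 0).toNat = s.toNat from by omega, hrow]
  generalize s.toNat = t
  rw [zipCols3 t _ _ _ (by simp) (by simp)]
  rw [show ([" "] ++ List.replicate t "|" ++ [" "] ++ List.replicate t " " ++ [" "])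
        = " " :: (List.replicate t "|" ++ " " :: (List.replicate t " " ++ [" "])) from by simp,
      show (["-"] ++ List.replicate t " " ++ ["-"] ++ List.replicate t " " ++ ["-"])
        = "-" :: (List.replicate t " " ++ "-" :: (List.replicate t " " ++ ["-"])) from by simp,
      show ([" "] ++ List.replicate t "|" ++ [" "] ++ List.replicate t "|" ++ [" "])
        = " " :: (List.replicate t "|" ++ " " :: (List.replicate t "|" ++ [" "])) from by simp]
  rw [rows3_cons, rows3_block, rows3_cons, rows3_block, rows3_last]
  simp
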